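-- pv_equiv track=rewrite | github.com/Rahul-RShankar/Ai_Evolution | civilization/competition.py | evaluate
-- ===== SOURCE A (Python) =====
-- def evaluate(results):
--
--     best_score = -1
--     winner = None
--
--     for agent_name, result in results.items():
--
--         score = 1 if result.get("success") else 0
--
--         if score > best_score:
--             best_score = score
--             winner = agent_name
--
--     return winner, best_score
-- ===== SOURCE B (Python) =====
-- def evaluate(results):
--     # First-match search: first agent with a truthy "success" wins with score 1;
--     # otherwise the first agent (if any) with score 0; empty -> (None, -1).
--     for agent_name, result in results.items():
--         if result.get("success"):
--             return agent_name, 1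
--     for agent_name in results:
--         return agent_name, 0
--     return None, -1
-- ===== Notes on version B (the rewrite author's own statement) =====
-- stated objective: simpler
-- what changed: Replaces the best_score/winner accumulator loop with an early-return first-success search plus a first-key fallback, dropping the score comparison entirely.
import Mathlib
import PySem

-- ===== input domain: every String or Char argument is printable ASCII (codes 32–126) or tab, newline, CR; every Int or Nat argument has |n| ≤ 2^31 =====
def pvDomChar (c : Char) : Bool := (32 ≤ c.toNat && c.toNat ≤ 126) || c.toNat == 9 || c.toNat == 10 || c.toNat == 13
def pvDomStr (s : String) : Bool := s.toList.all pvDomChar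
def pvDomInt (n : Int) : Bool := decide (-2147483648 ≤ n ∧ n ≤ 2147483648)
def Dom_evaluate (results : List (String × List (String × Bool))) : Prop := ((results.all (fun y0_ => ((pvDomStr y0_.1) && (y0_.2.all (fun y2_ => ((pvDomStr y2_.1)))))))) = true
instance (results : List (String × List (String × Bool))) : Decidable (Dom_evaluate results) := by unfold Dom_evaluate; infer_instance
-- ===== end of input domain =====

-- B replaces A's best_score/winner accumulator loop with an early-return first-success
-- search plus a first-key fallback (objective: simpler).

-- ===== PORT A =====
-- result.get("success") is truthy iff the key is present with value True (first match in the assoc list)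
def pvSuccess (r : List (String × Bool)) : Bool :=
  (r.find? (fun p => p.1 == "success")).elim false Prod.snd

-- the for-loop over results.items() carrying (best_score, winner)
def pvLoopA (st : Int × Option String) (l : List (String × List (String × Bool))) : Int × Option String :=
  l.foldl (fun st p =>
    let score : Int := if pvSuccess p.2 then 1 else 0
    if score > st.1 then (score, some p.1) else st) st

def evaluate (results : List (String × List (String × Bool))) : Option String × Int :=
  let st := pvLoopA (-1, none) results
  (st.2, st.1)

-- ===== PORT B =====
def evaluate_alt (results : List (String × List (String × Bool))) : Option String × Int :=
  match results.find? (fun p => pvSuccess p.2) with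
  | some p => (some p.1, 1)
  | none =>
    match results with
    | [] => (none, -1)
    | p :: _ => (some p.1, 0)

-- ===== PRECONDITION & SPEC =====
def Spec_evaluate (results : List (String × List (String × Bool))) (out : Option String × Int) : Prop := out = evaluate_alt results
instance (results : List (String × List (String × Bool))) (out : Option String × Int) : Decidable (Spec_evaluate results out) := by unfold Spec_evaluate; infer_instance

-- ===== CLAIM (what is proved, stated in full; the proofs are below) =====
def Claim_equal_evaluate : Prop := ∀ (results : List (String × List (String × Bool))), Dom_evaluate results → Spec_evaluate results (evaluate results)

-- ===== LEMMAS AND PROOFS =====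

-- once best_score is 1, the loop never changes state
theorem pvLoopA_one (l : List (String × List (String × Bool))) (w : Option String) :
    pvLoopA (1, w) l = (1, w) := by
  induction l with
  | nil => rfl
  | cons h t ih =>
    simp only [pvLoopA, List.foldl_cons] at *
    by_cases hs : pvSuccess h.2 <;> simp [hs, ih]

-- from state (0, w), the loop finds the first successful agent, else keeps w
theorem pvLoopA_zero (l : List (String × List (String × Bool))) (w : Option String) :
    pvLoopA (0, w) l =
      match l.find? (fun p => pvSuccess p.2) with
      | some p => (1, some p.1)
      | none => (0, w) := by
  induction l generalizing w with
  | nil => rfl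
  | cons h t ih =>
    by_cases hs : pvSuccess h.2
    · have hf : ((h :: t).find? (fun p => pvSuccess p.2)) = some h := by
        simp [hs]
      simp only [pvLoopA, List.foldl_cons, hs, hf]
      have := pvLoopA_one t (some h.1)
      simpa [pvLoopA] using this
    · have hf : ((h :: t).find? (fun p => pvSuccess p.2)) = t.find? (fun p => pvSuccess p.2) := by
        simp [hs]
      simp only [pvLoopA, List.foldl_cons, hs, hf]
      simpa [pvLoopA] using ih w

-- ===== VERDICT (by name: the statement is the Claim_ definition above) =====
theorem evaluate_spec : Claim_equal_evaluate := by
  intro results _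
  unfold Spec_evaluate evaluate evaluate_alt
  cases results with
  | nil => rfl
  | cons h t =>
    by_cases hs : pvSuccess h.2
    · have hf : ((h :: t).find? (fun p => pvSuccess p.2)) = some h := by
        simp [hs]
      simp only [pvLoopA, List.foldl_cons, hs, hf]
      have := pvLoopA_one t (some h.1)
      simp only [pvLoopA] at this
      simp [this]
    · have hf : ((h :: t).find? (fun p => pvSuccess p.2)) = t.find? (fun p => pvSuccess p.2) := by
        simp [hs]
      have hsc : (if pvSuccess h.2 = true then (1:Int) else 0) = 0 := by simp [hs]
      have h01 : (if (0:Int) > -1 then ((0:Int), some h.1) else (-1, none)) = ((0:Int), some h.1) := by norm_num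
      simp only [pvLoopA, List.foldl_cons, hsc, h01, hf]
      have := pvLoopA_zero t (some h.1)
      simp only [pvLoopA] at this
      rw [this]
      cases hff : t.find? (fun p => pvSuccess p.2) <;> simp
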